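-- pv_equiv track=rewrite | github.com/gynsora/TLT_pygame | TLT/utilities.py | diamond_form
-- ===== SOURCE A (Python) =====
-- def diamond_form(target_x,target_y, range_of_spell):
--     coordinates = []
--     # les 2 boucle serve à crée une zone en forme de losange
--     nb_tilese = range_of_spell-1
--     for z in range(target_y+1, target_y+range_of_spell+1):
--         for k in range(target_x-nb_tilese, target_x+nb_tilese+1):
--             coordinates.append(tuple((k, z)))
--         nb_tilese -= 1
--
--     nb_tiles = range_of_spell
--     for y in range(target_y ,target_y-range_of_spell-1, -1 ):
--         for x in range(target_x-nb_tiles, target_x+nb_tiles+1):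
--             coordinates.append(tuple((x, y)))
--         nb_tiles -= 1
--
--     return list(set(coordinates))
-- ===== SOURCE B (Python) =====
-- def diamond_form(target_x, target_y, range_of_spell):
--     # Generate only the lower half of the diamond (center row included), then
--     # obtain the upper half by reflecting it across the center line y = target_y;
--     # the diamond is the union of the two halves.
--     lower = []
--     for d in range(range_of_spell + 1):
--         half_width = range_of_spell - d
--         for x in range(target_x - half_width, target_x + half_width + 1):
--             lower.append((x, target_y - d))
--     upper = [(x, 2 * target_y - y) for (x, y) in lower if y != target_y]
--     return list(set(upper + lower))
-- ===== Notes on version B (the rewrite author's own statement) =====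
-- stated objective: simpler
-- what changed: B generates only the lower half of the diamond with one triangular loop and derives the upper half by reflecting that list across the center row (a filter+map point transformation), instead of A's second independently-coded triangular loop with its own decrementing width counter.
import Mathlib
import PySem

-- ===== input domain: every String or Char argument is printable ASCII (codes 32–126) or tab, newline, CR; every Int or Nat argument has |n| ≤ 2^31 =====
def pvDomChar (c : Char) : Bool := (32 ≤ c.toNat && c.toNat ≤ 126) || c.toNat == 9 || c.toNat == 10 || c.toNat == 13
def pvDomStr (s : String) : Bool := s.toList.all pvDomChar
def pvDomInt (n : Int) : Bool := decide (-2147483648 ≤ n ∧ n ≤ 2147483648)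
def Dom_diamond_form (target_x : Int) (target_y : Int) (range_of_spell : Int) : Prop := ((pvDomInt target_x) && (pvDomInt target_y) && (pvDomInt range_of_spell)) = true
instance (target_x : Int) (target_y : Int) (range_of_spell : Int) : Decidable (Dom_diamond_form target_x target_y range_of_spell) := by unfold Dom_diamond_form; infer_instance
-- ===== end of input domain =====

-- B generates only the lower triangle of the diamond and derives the upper triangle by
-- reflecting it across the center row, replacing A's second triangular loop (objective: simpler).


-- ===== PORT A =====
-- list(set(...)) is ported as PySem.Set.ofList (set iteration order is not modelled; outputs are compared as sets).
def diamond_form (target_x : Int) (target_y : Int) (range_of_spell : Int) : List (Int × Int) :=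
  let s1 := (PySem.List.pyRange (target_y + 1) (target_y + range_of_spell + 1) 1).foldl
      (fun (st : List (Int × Int) × Int) z =>
        ((PySem.List.pyRange (target_x - st.2) (target_x + st.2 + 1) 1).foldl
            (fun acc k => acc ++ [(k, z)]) st.1,
         st.2 - 1))
      ([], range_of_spell - 1)
  let s2 := (PySem.List.pyRange target_y (target_y - range_of_spell - 1) (-1)).foldl
      (fun (st : List (Int × Int) × Int) y =>
        ((PySem.List.pyRange (target_x - st.2) (target_x + st.2 + 1) 1).foldl
            (fun acc x => acc ++ [(x, y)]) st.1,
         st.2 - 1))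
      (s1.1, range_of_spell)
  PySem.Set.ofList s2.1

-- ===== PORT B =====
def diamond_form_alt (target_x : Int) (target_y : Int) (range_of_spell : Int) : List (Int × Int) :=
  let lower := (PySem.List.pyRange 0 (range_of_spell + 1) 1).foldl
      (fun acc d =>
        let half_width := range_of_spell - d
        (PySem.List.pyRange (target_x - half_width) (target_x + half_width + 1) 1).foldl
          (fun a x => a ++ [(x, target_y - d)]) acc)
      []
  let upper := (lower.filter (fun p => p.2 != target_y)).map (fun p => (p.1, 2 * target_y - p.2))
  PySem.Set.ofList (upper ++ lower)

-- ===== PRECONDITION & SPEC =====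
def Spec_diamond_form (target_x : Int) (target_y : Int) (range_of_spell : Int) (out : List (Int × Int)) : Prop := out = diamond_form_alt target_x target_y range_of_spell
instance (target_x : Int) (target_y : Int) (range_of_spell : Int) (out : List (Int × Int)) : Decidable (Spec_diamond_form target_x target_y range_of_spell out) := by unfold Spec_diamond_form; infer_instance

-- ===== CLAIM (what is proved, stated in full; the proofs are below) =====
def Claim_equal_diamond_form : Prop := ∀ (target_x : Int) (target_y : Int) (range_of_spell : Int), Dom_diamond_form target_x target_y range_of_spell → Spec_diamond_form target_x target_y range_of_spell (diamond_form target_x target_y range_of_spell)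

-- ===== LEMMAS AND PROOFS =====
def pvRow (tx z w : Int) : List (Int × Int) :=
  (PySem.List.pyRange (tx - w) (tx + w + 1) 1).map (fun k => (k, z))

def pvRows (tx : Int) (n : Nat) (z0 c0 step : Int) : List (Int × Int) :=
  match n with
  | 0 => []
  | n+1 => pvRow tx z0 c0 ++ pvRows tx n (z0 + step) (c0 - 1) step

theorem pvInner (tx z w : Int) (acc : List (Int × Int)) :
    (PySem.List.pyRange (tx - w) (tx + w + 1) 1).foldl (fun a k => a ++ [(k, z)]) acc
      = acc ++ pvRow tx z w := by
  rw [PySem.List.foldl_append_singleton_eq_map]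
  rfl

theorem pvLoop1 (tx : Int) (n : Nat) (z0 c0 : Int) (acc : List (Int × Int)) :
    (PySem.List.pyRange z0 (z0 + n) 1).foldl
      (fun (st : List (Int × Int) × Int) z => (st.1 ++ pvRow tx z st.2, st.2 - 1))
      (acc, c0)
    = (acc ++ pvRows tx n z0 c0 1, c0 - n) := by
  induction n generalizing z0 c0 acc with
  | zero => simp [pvRows]
  | succ n ih =>
      rw [show (z0 + ((n+1 : Nat) : Int)) = (z0 + 1) + (n : Int) by push_cast; ring,
          PySem.List.pyRange_one_cons (by omega : z0 < z0 + 1 + n)]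
      simp only [List.foldl_cons]
      rw [ih]
      refine Prod.ext ?_ (by push_cast; ring)
      simp [pvRows]

theorem pvLoop2 (tx : Int) (n : Nat) (y0 c0 : Int) (acc : List (Int × Int)) :
    (PySem.List.pyRange y0 (y0 - n) (-1)).foldl
      (fun (st : List (Int × Int) × Int) y => (st.1 ++ pvRow tx y st.2, st.2 - 1))
      (acc, c0)
    = (acc ++ pvRows tx n y0 c0 (-1), c0 - n) := by
  induction n generalizing y0 c0 acc with
  | zero => simp [pvRows]
  | succ n ih =>
      rw [show (y0 - ((n+1 : Nat) : Int)) = (y0 - 1) - (n : Int) by push_cast; ring,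
          PySem.List.pyRange_neg_one_cons (by omega : y0 - 1 - (n:Int) < y0)]
      simp only [List.foldl_cons]
      rw [ih]
      refine Prod.ext ?_ (by push_cast; ring)
      simp [pvRows]
      ring_nf

theorem pvLoopLow (tx ty r : Int) (n : Nat) (a : Int) (acc : List (Int × Int)) :
    (PySem.List.pyRange a (a + n) 1).foldl
      (fun acc d => acc ++ pvRow tx (ty - d) (r - d)) acc
    = acc ++ pvRows tx n (ty - a) (r - a) (-1) := by
  induction n generalizing a acc with
  | zero => simp [pvRows]
  | succ n ih =>
      rw [show (a + ((n+1 : Nat) : Int)) = (a + 1) + (n : Int) by push_cast; ring,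
          PySem.List.pyRange_one_cons (by omega : a < a + 1 + n)]
      simp only [List.foldl_cons]
      rw [ih]
      simp only [pvRows, List.append_assoc]
      rw [show ty - (a + 1) = ty - a + (-1) by ring, show r - (a + 1) = r - a - 1 by ring]

theorem pvRow_snd (tx z w : Int) (p : Int × Int) (hp : p ∈ pvRow tx z w) : p.2 = z := by
  rcases List.mem_map.mp hp with ⟨k, _, rfl⟩
  rfl

theorem pvRow_filter_eq_nil (tx z w ty : Int) (h : z = ty) :
    (pvRow tx z w).filter (fun p => p.2 != ty) = [] := by
  apply List.filter_eq_nil_iff.mpr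
  intro p hp
  simp [pvRow_snd tx z w p hp, h]

theorem pvRow_filter_eq_self (tx z w ty : Int) (h : z ≠ ty) :
    (pvRow tx z w).filter (fun p => p.2 != ty) = pvRow tx z w := by
  apply List.filter_eq_self.mpr
  intro p hp
  simp [pvRow_snd tx z w p hp, h]

theorem pvRow_map_reflect (tx z w ty : Int) :
    (pvRow tx z w).map (fun p => (p.1, 2 * ty - p.2)) = pvRow tx (2 * ty - z) w := by
  simp [pvRow, List.map_map, Function.comp]

theorem pvReflect (tx ty : Int) (n : Nat) (a c : Int) (ha : 1 ≤ a) :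
    ((pvRows tx n (ty - a) c (-1)).filter (fun p => p.2 != ty)).map
        (fun p => (p.1, 2 * ty - p.2))
      = pvRows tx n (ty + a) c 1 := by
  induction n generalizing a c with
  | zero => simp [pvRows]
  | succ n ih =>
      simp only [pvRows, List.filter_append, List.map_append]
      rw [pvRow_filter_eq_self tx (ty - a) c ty (by omega),
          pvRow_map_reflect tx (ty - a) c ty,
          show 2 * ty - (ty - a) = ty + a by ring,
          show ty - a + -1 = ty - (a + 1) by ring,
          ih (a + 1) (c - 1) (by omega)]
      rw [show ty + (a + 1) = ty + a + 1 by ring]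

theorem pvMain (tx ty r : Int) : diamond_form tx ty r = diamond_form_alt tx ty r := by
  unfold diamond_form diamond_form_alt
  simp only [pvInner]
  by_cases hr : 0 ≤ r
  · obtain ⟨m, hm⟩ : ∃ m : Nat, r = m := ⟨r.toNat, (Int.toNat_of_nonneg hr).symm⟩
    subst hm
    rw [show ty + (m : Int) + 1 = (ty + 1) + (m : Int) by ring, pvLoop1]
    rw [show ty - (m : Int) - 1 = ty - ((m + 1 : Nat) : Int) by push_cast; ring, pvLoop2]
    rw [show (m : Int) + 1 = 0 + ((m + 1 : Nat) : Int) by push_cast; ring, pvLoopLow]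
    simp only [List.nil_append, sub_zero]
    congr 1
    have hlow : pvRows tx (m + 1) ty (m : Int) (-1)
        = pvRow tx ty m ++ pvRows tx m (ty - 1) ((m : Int) - 1) (-1) := by
      simp only [pvRows]
      ring_nf
    rw [hlow, List.filter_append, List.map_append,
        pvRow_filter_eq_nil tx ty m ty rfl,
        show ty - 1 = ty - (1 : Int) by ring,
        pvReflect tx ty m 1 ((m : Int) - 1) le_rfl]
    simp
  · rw [PySem.List.pyRange_one_eq_nil (by omega : ty + r + 1 ≤ ty + 1),
        PySem.List.pyRange_neg_one_eq_nil (by omega : ty ≤ ty - r - 1),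
        PySem.List.pyRange_one_eq_nil (by omega : r + 1 ≤ 0)]
    rfl

-- ===== VERDICT (by name: the statement is the Claim_ definition above) =====
theorem diamond_form_spec : Claim_equal_diamond_form := by
  intro tx ty r _
  unfold Spec_diamond_form
  exact pvMain tx ty r
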